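-- pv_equiv track=rewrite | github.com/MrBrantCode/unitest_baseline | mut_generate/mist_train_taco/taco_5192/solution.py | count_divisible_numbers
-- ===== SOURCE A (Python) =====
-- import math
--
-- def count_divisible_numbers(nums, k):
--     ans = 0
--     n = len(nums)
--     for i in range(1, 1 << n):
--         cnt = 0
--         val = 1
--         for j in range(n):
--             if i & 1 << j:
--                 cnt += 1
--                 val = val * nums[j] // math.gcd(val, nums[j])
--         sign = 1 if cnt % 2 else -1
--         ans += sign * (k // val)
--     return ans
-- ===== SOURCE B (Python) =====
-- import math
--
-- def count_divisible_numbers(nums, k):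
--     # Incremental inclusion-exclusion: fold over nums, maintaining a table of
--     # (lcm, sign) for every subset seen so far; the empty subset is combos[0].
--     combos = [(1, -1)]
--     for num in nums:
--         combos += [(v * num // math.gcd(v, num), -s) for (v, s) in combos]
--     total = 0
--     for v, s in combos[1:]:
--         total += s * (k // v)
--     return total
-- ===== Notes on version B (the rewrite author's own statement) =====
-- stated objective: alternative
-- what changed: Replaces the bitmask double loop (for each of the 2^n masks, rescan all n elements testing bits) with a single incremental fold over nums that doubles a table of (lcm, sign) subset combinations, then sums sign*(k//lcm) over the non-empty entries.
import Mathlib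
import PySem

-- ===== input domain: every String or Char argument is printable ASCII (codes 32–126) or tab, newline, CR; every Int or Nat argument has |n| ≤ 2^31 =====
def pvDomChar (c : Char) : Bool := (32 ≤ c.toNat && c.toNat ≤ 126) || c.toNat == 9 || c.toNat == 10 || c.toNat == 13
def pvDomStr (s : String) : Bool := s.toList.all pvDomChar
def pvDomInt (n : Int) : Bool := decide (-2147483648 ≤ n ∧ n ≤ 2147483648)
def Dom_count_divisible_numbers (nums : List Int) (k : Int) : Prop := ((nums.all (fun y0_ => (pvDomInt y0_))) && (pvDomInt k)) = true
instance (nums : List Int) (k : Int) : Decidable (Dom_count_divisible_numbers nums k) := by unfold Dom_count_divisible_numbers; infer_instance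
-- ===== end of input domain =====

-- B replaces A's bitmask double loop with one incremental fold over nums that doubles
-- a table of (lcm, sign) subset combinations (a different decomposition, same cost class).

-- ===== PORT A =====
def count_divisible_numbers (nums : List Int) (k : Int) : Int :=
  let n : Nat := nums.length
  (PySem.List.pyRange 1 ((1:Int) <<< n) 1).foldl (fun ans i =>
    let cv := (PySem.List.pyRange 0 (n : Int) 1).foldl
      (fun (cv : Int × Int) j =>
        if PySem.Int.band i ((1:Int) <<< j.toNat) ≠ 0 then
          (cv.1 + 1,
           PySem.Int.floordiv (cv.2 * PySem.List.pyGetD nums j 0)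
             (Int.gcd cv.2 (PySem.List.pyGetD nums j 0)))
        else cv) ((0:Int), (1:Int))
    let sign : Int := if PySem.Int.mod cv.1 2 ≠ 0 then 1 else -1
    ans + sign * PySem.Int.floordiv k cv.2) 0

-- ===== PORT B =====
def count_divisible_numbers_alt (nums : List Int) (k : Int) : Int :=
  let combos := nums.foldl
    (fun (cs : List (Int × Int)) num =>
      cs ++ cs.map (fun p => (PySem.Int.floordiv (p.1 * num) (Int.gcd p.1 num), -p.2)))
    [((1:Int), (-1:Int))]
  (combos.drop 1).foldl (fun total p => total + p.2 * PySem.Int.floordiv k p.1) 0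

-- ===== PRECONDITION & SPEC =====
-- Pre_ excludes exactly the inputs where Python A raises ZeroDivisionError (some num is 0,
-- so the accumulated lcm is 0 and `k // val` divides by zero); B raises there too.
def Pre_count_divisible_numbers (nums : List Int) (k : Int) : Prop := (0 : Int) ∉ nums
instance (nums : List Int) (k : Int) : Decidable (Pre_count_divisible_numbers nums k) := by unfold Pre_count_divisible_numbers; infer_instance
def pvWitness_count_divisible_numbers : List Int × Int := ([2, 3, -4], 10)

def Spec_count_divisible_numbers (nums : List Int) (k : Int) (out : Int) : Prop := out = count_divisible_numbers_alt nums k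
instance (nums : List Int) (k : Int) (out : Int) : Decidable (Spec_count_divisible_numbers nums k out) := by unfold Spec_count_divisible_numbers; infer_instance

-- ===== CLAIM (what is proved, stated in full; the proofs are below) =====
def Claim_equal_count_divisible_numbers : Prop := ∀ (nums : List Int) (k : Int), Dom_count_divisible_numbers nums k → Pre_count_divisible_numbers nums k → Spec_count_divisible_numbers nums k (count_divisible_numbers nums k)

-- ===== LEMMAS AND PROOFS =====

-- Python's val*num//gcd step (the lcm-like accumulator both programs use).
def pvLcm (v a : Int) : Int := PySem.Int.floordiv (v * a) (Int.gcd v a)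

-- (cnt, val) of the subset encoded by the low bits of i, consumed low-to-high along the list.
def pvCv : List Int → Nat → Int × Int → Int × Int
  | [], _, cv => cv
  | a :: l, i, cv => pvCv l (i / 2) (if i % 2 = 1 then (cv.1 + 1, pvLcm cv.2 a) else cv)

-- (val, sign) pair B stores for mask i.
def pvPair (nums : List Int) (i : Nat) : Int × Int :=
  let cv := pvCv nums i ((0:Int), (1:Int))
  (cv.2, if cv.1 % 2 = 1 then (1:Int) else -1)

theorem pvCv_append (l : List Int) (a : Int) : ∀ (i : Nat) (cv : Int × Int),
    pvCv (l ++ [a]) i cv =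
      (if (i / 2 ^ l.length) % 2 = 1 then
        ((pvCv l i cv).1 + 1, pvLcm (pvCv l i cv).2 a) else pvCv l i cv) := by
  induction l with
  | nil => intro i cv; simp [pvCv]
  | cons b l ih =>
      intro i cv
      simp only [List.cons_append, pvCv, ih, List.length_cons]
      have : i / 2 / 2 ^ l.length = i / 2 ^ (l.length + 1) := by
        rw [Nat.div_div_eq_div_mul]; congr 1; ring
      rw [this]

theorem pvCv_add_pow_mul (l : List Int) : ∀ (i t : Nat) (cv : Int × Int),
    pvCv l (i + 2 ^ l.length * t) cv = pvCv l i cv := by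
  induction l with
  | nil => intro i t cv; simp [pvCv]
  | cons a l ih =>
      intro i t cv
      have hp : (0:Nat) < 2 ^ l.length := Nat.two_pow_pos _
      have h2 : 2 ^ (l.length + 1) * t = 2 * (2 ^ l.length * t) := by ring
      simp only [pvCv, List.length_cons, h2]
      have hm : (i + 2 * (2 ^ l.length * t)) % 2 = i % 2 := by omega
      have hd : (i + 2 * (2 ^ l.length * t)) / 2 = i / 2 + 2 ^ l.length * t := by omega
      rw [hm, hd, ih]

-- A's inner loop over range(n), stated over Nat indices and testBit.
theorem pvInner_eq (nums : List Int) : ∀ (i : Nat) (cv : Int × Int),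
    (List.range nums.length).foldl
      (fun cv j => if i.testBit j then (cv.1 + 1, pvLcm cv.2 (nums.getD j 0)) else cv) cv
    = pvCv nums i cv := by
  induction nums with
  | nil => intro i cv; simp [pvCv]
  | cons a l ih =>
      intro i cv
      rw [List.length_cons, List.range_succ_eq_map, List.foldl_cons, List.foldl_map]
      simp only [Nat.testBit_zero, List.getD_cons_zero, Nat.succ_eq_add_one,
        Nat.testBit_add_one, List.getD_cons_succ]
      rw [ih (i / 2)]
      simp only [pvCv]
      by_cases h : i % 2 = 1 <;> simp [h]

theorem pvShiftN (j : Nat) : (1:Int) <<< j = ((2 ^ j : Nat) : Int) := by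
  rw [Int.shiftLeft_eq', one_mul]

theorem pvShift (j : Nat) : (1:Int) <<< (j:Int) = ((2 ^ j : Nat) : Int) := by
  rw [Int.shiftLeft_natCast_right, pvShiftN]

theorem pvBand_bit (i j : Nat) :
    (PySem.Int.band (i : Int) ((1:Int) <<< (j:Int)) ≠ 0) ↔ i.testBit j := by
  rw [pvShift, PySem.Int.band_natCast]
  rw [show (i &&& 2 ^ j) = (i.testBit j).toNat * 2 ^ j from Nat.and_two_pow i j]
  cases h : i.testBit j <;> simp

-- A's inner loop in its ported form equals pvCv.
theorem pvInnerA (nums : List Int) (i : Nat) :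
    (PySem.List.pyRange 0 (nums.length : Int) 1).foldl
      (fun (cv : Int × Int) j =>
        if PySem.Int.band (i : Int) ((1:Int) <<< ((j.toNat : Nat) : Int)) ≠ 0 then
          (cv.1 + 1,
           PySem.Int.floordiv (cv.2 * PySem.List.pyGetD nums j 0)
             (Int.gcd cv.2 (PySem.List.pyGetD nums j 0)))
        else cv) ((0:Int), (1:Int))
    = pvCv nums i ((0:Int), (1:Int)) := by
  rw [PySem.List.pyRange_one]
  simp only [sub_zero, Int.toNat_natCast, List.foldl_map, zero_add, Int.toNat_natCast,
    PySem.List.pyGetD_natCast]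
  rw [← pvInner_eq nums i]
  congr 1
  funext cv j
  by_cases h : i.testBit j
  · rw [if_pos ((pvBand_bit i j).2 h), if_pos h]; rfl
  · rw [if_neg (fun hc => h ((pvBand_bit i j).1 hc)), if_neg h]

-- the sign stored by B flips exactly as cnt's parity does.
theorem pvSign_flip (c : Int) :
    (if (c + 1) % 2 = 1 then (1:Int) else -1) = -(if c % 2 = 1 then (1:Int) else -1) := by
  have := Int.emod_two_eq c
  rcases this with h | h <;>
    · have h2 : (c + 1) % 2 = (c % 2 + 1) % 2 := by omega
      rw [h2, h] <;> norm_num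

-- B's combos table is exactly pvPair over all masks.
theorem pvCombos (nums : List Int) :
    nums.foldl
      (fun (cs : List (Int × Int)) num =>
        cs ++ cs.map (fun p => (PySem.Int.floordiv (p.1 * num) (Int.gcd p.1 num), -p.2)))
      [((1:Int), (-1:Int))]
    = (List.range (2 ^ nums.length)).map (pvPair nums) := by
  induction nums using List.reverseRecOn with
  | nil => simp [pvPair, pvCv]
  | append_singleton l a ih =>
      rw [List.foldl_append, List.foldl_cons, List.foldl_nil, ih]
      have hlen : (l ++ [a]).length = l.length + 1 := by simp
      have hpow : 2 ^ (l.length + 1) = 2 ^ l.length + 2 ^ l.length := by ring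
      rw [hlen, hpow, List.range_add, List.map_append, List.map_map, List.map_map]
      congr 1
      · apply List.map_congr_left
        intro i hi
        rw [List.mem_range] at hi
        unfold pvPair
        rw [pvCv_append, Nat.div_eq_of_lt hi]
        simp
      · apply List.map_congr_left
        intro i hi
        rw [List.mem_range] at hi
        unfold pvPair
        simp only [Function.comp]
        rw [pvCv_append]
        rw [show 2 ^ l.length + i = i + 2 ^ l.length * 1 from by ring]
        rw [pvCv_add_pow_mul]
        have hp : (0:Nat) < 2 ^ l.length := Nat.two_pow_pos _
        have hd : (i + 2 ^ l.length * 1) / 2 ^ l.length = 1 := by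
          rw [Nat.add_mul_div_left _ _ hp, Nat.div_eq_of_lt hi]
        rw [hd]
        norm_num
        rw [pvSign_flip]
        exact ⟨rfl, rfl⟩

-- ===== VERDICT (by name: the statement is the Claim_ definition above) =====
theorem count_divisible_numbers_spec : Claim_equal_count_divisible_numbers := by
  intro nums k _ _
  unfold Spec_count_divisible_numbers
  simp only [count_divisible_numbers, count_divisible_numbers_alt]
  rw [pvCombos, pvShiftN]
  have hpos : (0:Nat) < 2 ^ nums.length := Nat.two_pow_pos _
  have hdrop : (List.range (2 ^ nums.length)).drop 1
      = (List.range (2 ^ nums.length - 1)).map (fun x => 1 + x) := by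
    rw [show 2 ^ nums.length = 1 + (2 ^ nums.length - 1) from by omega, List.range_add]
    simp [List.range_succ]
  rw [← List.map_drop, hdrop, List.map_map,
    PySem.List.pyRange_one 1 ((2 ^ nums.length : Nat) : Int), List.foldl_map, List.foldl_map]
  rw [show (((2 ^ nums.length : Nat) : Int) - 1).toNat = 2 ^ nums.length - 1 from by omega]
  congr 1
  funext ans x
  have hxc : ((1:Int) + (x : Int)) = ((1 + x : Nat) : Int) := by omega
  rw [hxc, pvInnerA nums (1 + x)]
  simp only [Function.comp, pvPair]
  rcases Int.emod_two_eq (pvCv nums (1 + x) ((0:Int), (1:Int))).1 with h | h <;>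
    simp [PySem.Int.mod_eq_emod_of_pos, h]
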